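-- pv_equiv track=rewrite | github.com/pastorcmentarny/DomJavaKB | python/src/tools/lotto/euromillions/euromillions_analysis.py | count_ball_played_between_games
-- ===== SOURCE A (Python) =====
-- def count_ball_played_between_games(selected_ball: int, draw_list: list) -> dict:
--     counter_between_games = {}
--     for a_number in range(1, 11):
--         a_number = int(a_number)
--         counter_between_games[a_number] = 0
--     counter_between_games[99] = 0
--     last_played_ball = 0
--     for draw in draw_list:
--         last_played_ball = last_played_ball + 1
--         for ball in range(2, 7):
--             if selected_ball == int(draw[ball]):
--                 if last_played_ball > 10:
--                     counter_between_games[99] = counter_between_games.get(99) + 1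
--                 else:
--                     counter_between_games[last_played_ball] = counter_between_games.get(last_played_ball) + 1
--                 last_played_ball = 0
--
--     return counter_between_games.copy()
-- ===== SOURCE B (Python) =====
-- def count_ball_played_between_games(selected_ball: int, draw_list: list) -> dict:
--     # Pass 1: record the 1-based draw numbers at which the selected ball appeared.
--     events = []
--     for i, draw in enumerate(draw_list, 1):
--         for ball in range(2, 7):
--             if selected_ball == int(draw[ball]):
--                 events.append(i)
--     # Pass 2: turn consecutive event positions into gap counts.
--     counter = {a: 0 for a in range(1, 11)}
--     counter[99] = 0
--     base = 0
--     for e in events: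
--         gap = e - base
--         key = gap if gap <= 10 else 99
--         counter[key] = counter[key] + 1
--         base = e
--     return counter.copy()
-- ===== Notes on version B (the rewrite author's own statement) =====
-- stated objective: alternative
-- what changed: A interleaves counting and gap tracking in one stateful loop (a draws-since-last-hit counter reset on each hit); B separates concerns into two passes: first collect the 1-based draw numbers where the ball appeared, then fold over that event list turning differences of consecutive positions into gap-bucket increments.
import Mathlib
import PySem

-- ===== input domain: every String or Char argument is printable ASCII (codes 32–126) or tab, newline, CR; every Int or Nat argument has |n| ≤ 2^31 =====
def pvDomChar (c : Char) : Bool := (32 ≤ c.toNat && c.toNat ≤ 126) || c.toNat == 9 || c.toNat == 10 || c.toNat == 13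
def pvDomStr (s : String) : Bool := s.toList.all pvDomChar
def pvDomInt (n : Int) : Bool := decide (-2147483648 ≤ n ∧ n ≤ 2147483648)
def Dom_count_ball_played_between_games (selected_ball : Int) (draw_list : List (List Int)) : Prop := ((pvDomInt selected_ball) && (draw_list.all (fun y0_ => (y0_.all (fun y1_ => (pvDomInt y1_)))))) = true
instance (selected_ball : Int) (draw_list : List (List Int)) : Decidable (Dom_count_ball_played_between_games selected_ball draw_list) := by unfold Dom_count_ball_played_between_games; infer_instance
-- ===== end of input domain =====

-- B replaces A's single stateful loop (draws-since-last-hit counter, reset on hit) by two passes: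
-- collect the 1-based draw numbers where the ball appears, then fold differences of consecutive
-- event positions into the gap buckets. Same cost; objective: alternative decomposition.

-- ===== PORT A =====
def count_ball_played_between_games (selected_ball : Int) (draw_list : List (List Int)) : List (Int × Int) :=
  let counter : PySem.Dict Int Int :=
    ((PySem.List.pyRange 1 11 1).foldl (fun d a => d.insert a 0) PySem.Dict.empty).insert 99 0
  let st :=
    draw_list.foldl
      (fun (st : PySem.Dict Int Int × Int) draw =>
        -- last_played_ball = last_played_ball + 1
        (PySem.List.pyRange 2 7 1).foldl
          (fun (s : PySem.Dict Int Int × Int) ball =>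
            -- draw[ball]: IndexError on a draw shorter than 7, excluded by Pre_ (default never read there)
            if selected_ball == PySem.List.pyGetD draw ball 0 then
              -- counter.get(k) + 1: the key is present for every input Pre_ admits (else Python TypeError)
              if s.2 > 10 then (s.1.insert 99 (s.1.getD 99 0 + 1), 0)
              else (s.1.insert s.2 (s.1.getD s.2 0 + 1), 0)
            else s)
          (st.1, st.2 + 1))
      (counter, 0)
  st.1.items

-- ===== PORT B =====
def count_ball_played_between_games_alt (selected_ball : Int) (draw_list : List (List Int)) : List (Int × Int) :=
  -- pass 1: events = 1-based draw numbers at which the selected ball appeared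
  let events : List Int :=
    (PySem.List.enumerate draw_list 1).foldl
      (fun acc p =>
        (PySem.List.pyRange 2 7 1).foldl
          (fun acc2 ball =>
            -- draw[ball]: IndexError on a short draw, excluded by Pre_ (default never read there)
            if selected_ball == PySem.List.pyGetD p.2 ball 0 then acc2 ++ [p.1] else acc2)
          acc)
      []
  let counter : PySem.Dict Int Int :=
    ((PySem.List.pyRange 1 11 1).foldl (fun d a => d.insert a 0) PySem.Dict.empty).insert 99 0
  -- pass 2: gaps between consecutive events
  let st :=
    events.foldl
      (fun (s : PySem.Dict Int Int × Int) e =>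
        let gap := e - s.2
        let key := if gap ≤ 10 then gap else 99
        -- counter[key] + 1: key present for every input Pre_ admits (else Python KeyError)
        (s.1.insert key (s.1.getD key 0 + 1), e))
      (counter, 0)
  st.1.items

-- ===== PRECONDITION & SPEC =====
-- Pre_ excludes exactly the inputs on which A raises: a draw shorter than 7 entries (IndexError at
-- draw[ball]) and a draw containing the selected ball more than once in positions 2..6 (the second
-- match looks up counter.get(0), i.e. None + 1, a TypeError).
def Pre_count_ball_played_between_games (selected_ball : Int) (draw_list : List (List Int)) : Prop :=
  ∀ draw ∈ draw_list, 7 ≤ draw.length ∧ ((draw.drop 2).take 5).count selected_ball ≤ 1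
instance (selected_ball : Int) (draw_list : List (List Int)) : Decidable (Pre_count_ball_played_between_games selected_ball draw_list) := by unfold Pre_count_ball_played_between_games; infer_instance

def pvWitness_count_ball_played_between_games : Int × List (List Int) :=
  (7, [[1, 2, 7, 4, 5, 6, 0], [0, 0, 1, 2, 3, 4, 5], [9, 9, 3, 4, 7, 6, 1]])

def Spec_count_ball_played_between_games (selected_ball : Int) (draw_list : List (List Int)) (out : List (Int × Int)) : Prop := out = count_ball_played_between_games_alt selected_ball draw_list
instance (selected_ball : Int) (draw_list : List (List Int)) (out : List (Int × Int)) : Decidable (Spec_count_ball_played_between_games selected_ball draw_list out) := by unfold Spec_count_ball_played_between_games; infer_instance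

-- ===== CLAIM (what is proved, stated in full; the proofs are below) =====
def Claim_equal_count_ball_played_between_games : Prop := ∀ (selected_ball : Int) (draw_list : List (List Int)), Dom_count_ball_played_between_games selected_ball draw_list → Pre_count_ball_played_between_games selected_ball draw_list → Spec_count_ball_played_between_games selected_ball draw_list (count_ball_played_between_games selected_ball draw_list)

-- ===== LEMMAS AND PROOFS =====

-- abstract pieces both loops are reduced to
def pvBump (c : PySem.Dict Int Int) (k : Int) : PySem.Dict Int Int := c.insert k (c.getD k 0 + 1)
def pvKey (g : Int) : Int := if g > 10 then 99 else g
def pvP (sel : Int) (draw : List Int) (b : Int) : Bool := sel == PySem.List.pyGetD draw b 0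
def pvHit (sel : Int) (draw : List Int) : Bool := (PySem.List.pyRange 2 7 1).any (pvP sel draw)

-- the sequence of gap keys A bumps, starting with l draws already elapsed
def pvGaps (sel : Int) : Int → List (List Int) → List Int
  | _, [] => []
  | l, d :: ds => if pvHit sel d then pvKey (l + 1) :: pvGaps sel 0 ds else pvGaps sel (l + 1) ds

-- the event positions B collects, starting at index i
def pvEvs (sel : Int) : Int → List (List Int) → List Int
  | _, [] => []
  | i, d :: ds => (if pvHit sel d then [i] else []) ++ pvEvs sel (i + 1) ds

-- the gap keys B bumps from an event list and a base
def pvBKeys : Int → List Int → List Int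
  | _, [] => []
  | base, e :: es => pvKey (e - base) :: pvBKeys e es

lemma stepA_eq (sel : Int) (draw : List Int) :
    (fun (s : PySem.Dict Int Int × Int) ball =>
        if sel == PySem.List.pyGetD draw ball 0 then
          if s.2 > 10 then (s.1.insert 99 (s.1.getD 99 0 + 1), 0)
          else (s.1.insert s.2 (s.1.getD s.2 0 + 1), 0)
        else s)
      = (fun (s : PySem.Dict Int Int × Int) ball =>
          if pvP sel draw ball then (pvBump s.1 (pvKey s.2), (0 : Int)) else s) := by
  funext s ball
  simp only [pvP, pvBump, pvKey]
  split_ifs <;> rfl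

lemma inner_skip (sel : Int) (draw : List Int) (balls : List Int)
    (h : balls.countP (pvP sel draw) = 0) (s : PySem.Dict Int Int × Int) :
    balls.foldl (fun (s : PySem.Dict Int Int × Int) ball =>
        if pvP sel draw ball then (pvBump s.1 (pvKey s.2), (0 : Int)) else s) s = s := by
  induction balls generalizing s with
  | nil => rfl
  | cons b bs ih =>
    rw [List.countP_cons] at h
    cases hb : pvP sel draw b
    · rw [hb] at h
      simp only [Bool.false_eq_true, if_false, Nat.add_zero] at h
      rw [List.foldl_cons]
      simp only [hb, Bool.false_eq_true, if_false]
      exact ih h s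
    · rw [hb] at h
      simp at h

lemma inner_fold (sel : Int) (draw : List Int) (balls : List Int)
    (h : balls.countP (pvP sel draw) ≤ 1) (c : PySem.Dict Int Int) (m : Int) :
    balls.foldl (fun (s : PySem.Dict Int Int × Int) ball =>
        if pvP sel draw ball then (pvBump s.1 (pvKey s.2), (0 : Int)) else s) (c, m)
      = if balls.any (pvP sel draw) then (pvBump c (pvKey m), 0) else (c, m) := by
  induction balls generalizing c m with
  | nil => rfl
  | cons b bs ih =>
    rw [List.countP_cons] at h
    rw [List.foldl_cons]
    cases hb : pvP sel draw b
    · rw [hb] at h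
      simp only [Bool.false_eq_true, if_false, Nat.add_zero] at h
      simp only [Bool.false_eq_true, if_false]
      rw [ih h c m]
      simp [List.any_cons, hb]
    · rw [hb] at h
      simp only [if_pos] at h
      have h0 : bs.countP (pvP sel draw) = 0 := by omega
      simp only [if_pos]
      rw [inner_skip sel draw bs h0]
      simp [List.any_cons, hb]

lemma outerA (sel : Int) (ds : List (List Int))
    (h : ∀ d ∈ ds, (PySem.List.pyRange 2 7 1).countP (pvP sel d) ≤ 1)
    (c : PySem.Dict Int Int) (l : Int) :
    (ds.foldl
        (fun (st : PySem.Dict Int Int × Int) draw =>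
          (PySem.List.pyRange 2 7 1).foldl
            (fun (s : PySem.Dict Int Int × Int) ball =>
              if sel == PySem.List.pyGetD draw ball 0 then
                if s.2 > 10 then (s.1.insert 99 (s.1.getD 99 0 + 1), 0)
                else (s.1.insert s.2 (s.1.getD s.2 0 + 1), 0)
              else s)
            (st.1, st.2 + 1))
        (c, l)).1
      = (pvGaps sel l ds).foldl pvBump c := by
  induction ds generalizing c l with
  | nil => rfl
  | cons d ds ih =>
    rw [List.foldl_cons]
    have hd := h d (by simp)
    have hrest : ∀ d' ∈ ds, (PySem.List.pyRange 2 7 1).countP (pvP sel d') ≤ 1 :=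
      fun d' hd' => h d' (by simp [hd'])
    rw [stepA_eq sel d, inner_fold sel d _ hd c (l + 1)]
    have hpv : (PySem.List.pyRange 2 7 1).any (pvP sel d) = pvHit sel d := rfl
    rw [hpv, pvGaps]
    cases hh : pvHit sel d
    · simp only [Bool.false_eq_true, if_false]
      exact ih hrest c (l + 1)
    · simp only [if_pos]
      rw [ih hrest (pvBump c (pvKey (l + 1))) 0, List.foldl_cons]

lemma outerB (events : List Int) (c : PySem.Dict Int Int) (base : Int) :
    (events.foldl
        (fun (s : PySem.Dict Int Int × Int) e =>
          let gap := e - s.2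
          let key := if gap ≤ 10 then gap else 99
          (s.1.insert key (s.1.getD key 0 + 1), e))
        (c, base)).1
      = (pvBKeys base events).foldl pvBump c := by
  induction events generalizing c base with
  | nil => rfl
  | cons e es ih =>
    rw [List.foldl_cons, pvBKeys, List.foldl_cons]
    have hkey : (let gap := e - ((c, base) : PySem.Dict Int Int × Int).2
          let key := if gap ≤ 10 then gap else 99
          (((c, base) : PySem.Dict Int Int × Int).1.insert key
            (((c, base) : PySem.Dict Int Int × Int).1.getD key 0 + 1), e))
        = (pvBump c (pvKey (e - base)), e) := by
      dsimp only
      simp only [pvBump, pvKey]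
      split_ifs <;> first | rfl | omega
    rw [hkey]
    exact ih (pvBump c (pvKey (e - base))) e

lemma count_eq_ite (sel : Int) (d : List Int)
    (h : (PySem.List.pyRange 2 7 1).countP (pvP sel d) ≤ 1) :
    (PySem.List.pyRange 2 7 1).countP (pvP sel d) = if pvHit sel d then 1 else 0 := by
  cases hh : pvHit sel d
  · simp only [Bool.false_eq_true, if_false]
    rw [List.countP_eq_zero]
    intro a ha
    have := (List.any_eq_false).mp hh a ha
    simpa using this
  · simp only [if_pos]
    obtain ⟨b, hb, hpb⟩ := List.any_eq_true.mp hh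
    have hpos : 0 < (PySem.List.pyRange 2 7 1).countP (pvP sel d) :=
      List.countP_pos_iff.mpr ⟨b, hb, hpb⟩
    omega

lemma events_inner (sel : Int) (d : List Int) (i : Int) (acc : List Int)
    (h : (PySem.List.pyRange 2 7 1).countP (pvP sel d) ≤ 1) :
    (PySem.List.pyRange 2 7 1).foldl
        (fun acc2 ball => if pvP sel d ball then acc2 ++ [i] else acc2) acc
      = acc ++ (if pvHit sel d then [i] else []) := by
  have h1 := PySem.List.foldl_append_if (pvP sel d) (fun _ => i) (PySem.List.pyRange 2 7 1) acc
  rw [h1, List.map_const']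
  congr 1
  rw [← List.countP_eq_length_filter, count_eq_ite sel d h]
  cases pvHit sel d <;> simp

lemma events_fold (sel : Int) (ds : List (List Int)) (i : Int) (acc : List Int)
    (h : ∀ d ∈ ds, (PySem.List.pyRange 2 7 1).countP (pvP sel d) ≤ 1) :
    (PySem.List.enumerate ds i).foldl
        (fun acc p =>
          (PySem.List.pyRange 2 7 1).foldl
            (fun acc2 ball =>
              if sel == PySem.List.pyGetD p.2 ball 0 then acc2 ++ [p.1] else acc2)
            acc)
        acc
      = acc ++ pvEvs sel i ds := by
  induction ds generalizing i acc with
  | nil => simp [PySem.List.enumerate_nil, pvEvs]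
  | cons d ds ih =>
    rw [PySem.List.enumerate_cons, List.foldl_cons]
    have hd := h d (by simp)
    have hrest : ∀ d' ∈ ds, (PySem.List.pyRange 2 7 1).countP (pvP sel d') ≤ 1 :=
      fun d' hd' => h d' (by simp [hd'])
    have hin : (PySem.List.pyRange 2 7 1).foldl
        (fun acc2 ball =>
          if sel == PySem.List.pyGetD ((i, d) : Int × List Int).2 ball 0 then
            acc2 ++ [((i, d) : Int × List Int).1] else acc2) acc
        = acc ++ (if pvHit sel d then [i] else []) := events_inner sel d i acc hd
    rw [hin, ih (i + 1) _ hrest, pvEvs, List.append_assoc]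

lemma keys_eq (sel : Int) (ds : List (List Int)) :
    ∀ (l i base : Int), base = i - 1 - l → pvBKeys base (pvEvs sel i ds) = pvGaps sel l ds := by
  induction ds with
  | nil => intro l i base _; rfl
  | cons d ds ih =>
    intro l i base hb
    rw [pvEvs, pvGaps]
    cases hh : pvHit sel d
    · simp only [Bool.false_eq_true, if_false, List.nil_append]
      exact ih (l + 1) (i + 1) base (by omega)
    · simp only [if_pos, List.singleton_append]
      rw [pvBKeys]
      have hg : i - base = l + 1 := by omega
      rw [hg, ih 0 (i + 1) i (by omega)]

-- Pre_'s per-draw condition, restated over the exact index loop the ports run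
lemma pre_bridge (sel : Int) (draw : List Int) (h7 : 7 ≤ draw.length) :
    (PySem.List.pyRange 2 7 1).countP (pvP sel draw) = ((draw.drop 2).take 5).count sel := by
  rcases draw with _ | ⟨a0, _ | ⟨a1, _ | ⟨a2, _ | ⟨a3, _ | ⟨a4, _ | ⟨a5, _ | ⟨a6, r⟩⟩⟩⟩⟩⟩⟩
  all_goals try (simp only [List.length_cons, List.length_nil] at h7; omega)
  have h : PySem.List.pyRange 2 7 1 = [(2 : Int), 3, 4, 5, 6] := by decide
  rw [h]
  show _ = ([a2, a3, a4, a5, a6]).count sel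
  simp only [pvP, List.countP_cons, List.countP_nil, List.count_cons, List.count_nil,
    PySem.List.pyGetD_ofNat']
  simp [@eq_comm Int sel]

-- ===== VERDICT (by name: the statement is the Claim_ definition above) =====
theorem count_ball_played_between_games_spec : Claim_equal_count_ball_played_between_games := by
  intro sel dl hdom hpre
  unfold Spec_count_ball_played_between_games
  unfold count_ball_played_between_games count_ball_played_between_games_alt
  have hcnt : ∀ d ∈ dl, (PySem.List.pyRange 2 7 1).countP (pvP sel d) ≤ 1 := by
    intro d hd
    obtain ⟨h7, hc⟩ := hpre d hd
    rw [pre_bridge sel d h7]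
    exact hc
  simp only
  rw [outerA sel dl hcnt _ 0]
  rw [events_fold sel dl 1 [] hcnt]
  rw [outerB _ _ 0]
  rw [List.nil_append, keys_eq sel dl 0 1 0 (by omega)]
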